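-- pv_equiv track=rewrite | github.com/STliuEN/CCGC | convert_full_dataset.py | _choose_triplet_key
-- ===== SOURCE A (Python) =====
-- def _choose_triplet_key(dataset_name: str, complete_triplets):
--     if not complete_triplets:
--         return None
--     if dataset_name in complete_triplets:
--         return dataset_name
--
--     keys = sorted(complete_triplets.keys())
--     for key in keys:
--         if key.lower() == dataset_name.lower():
--             return key
--     for key in keys:
--         if key.lower().startswith(dataset_name.lower()):
--             return key
--     return keys[0]
-- ===== SOURCE B (Python) =====
-- def _choose_triplet_key(dataset_name: str, complete_triplets):
--     if not complete_triplets: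
--         return None
--     if dataset_name in complete_triplets:
--         return dataset_name
--
--     target = dataset_name.lower()
--     best_exact = best_prefix = best_any = None
--     for key in complete_triplets.keys():
--         if best_any is None or key < best_any:
--             best_any = key
--         low = key.lower()
--         if low == target and (best_exact is None or key < best_exact):
--             best_exact = key
--         if low.startswith(target) and (best_prefix is None or key < best_prefix):
--             best_prefix = key
--     if best_exact is not None:
--         return best_exact
--     if best_prefix is not None:
--         return best_prefix
--     return best_any
-- ===== Notes on version B (the rewrite author's own statement) =====
-- stated objective: faster
-- what changed: Replaced sorted(keys) plus two sequential scans by a single pass over the keys that maintains three running lexicographic minima (exact case-insensitive match, prefix match, overall), returned in the same precedence order.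
import Mathlib
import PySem

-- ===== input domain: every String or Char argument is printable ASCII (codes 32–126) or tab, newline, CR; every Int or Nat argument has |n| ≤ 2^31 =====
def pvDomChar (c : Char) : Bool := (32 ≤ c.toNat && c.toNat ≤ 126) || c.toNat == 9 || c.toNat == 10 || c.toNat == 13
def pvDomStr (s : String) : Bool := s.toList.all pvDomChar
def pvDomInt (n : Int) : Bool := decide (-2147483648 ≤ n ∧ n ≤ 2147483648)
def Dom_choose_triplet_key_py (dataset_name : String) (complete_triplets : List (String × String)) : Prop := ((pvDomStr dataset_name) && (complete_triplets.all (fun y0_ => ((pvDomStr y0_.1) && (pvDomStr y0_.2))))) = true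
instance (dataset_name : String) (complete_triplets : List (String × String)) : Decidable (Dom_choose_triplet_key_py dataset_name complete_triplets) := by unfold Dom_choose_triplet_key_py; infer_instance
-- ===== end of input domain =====

-- B replaces A's sort-plus-two-scans by one pass that keeps three running lexicographic minima (exact / prefix / overall); objective: faster (no sort).

-- ===== PORT A =====
def choose_triplet_key_py (dataset_name : String) (complete_triplets : List (String × String)) : Option String :=
  if complete_triplets = [] then none
  else if dataset_name ∈ complete_triplets.map Prod.fst then some dataset_name
  else
    let keys := PySem.List.sorted (complete_triplets.map Prod.fst) (fun x => x) false
    match keys.find? (fun key => PySem.Str.lower key == PySem.Str.lower dataset_name) with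
    | some key => some key
    | none =>
      match keys.find? (fun key => PySem.Str.startswith (PySem.Str.lower key) (PySem.Str.lower dataset_name)) with
      | some key => some key
      | none => PySem.List.pyGet? keys 0

-- ===== PORT B =====
-- running minimum: best_any is None or key < best_any → best_any = key
def pvUpdMin (best : Option String) (key : String) : Option String :=
  match best with
  | none => some key
  | some b => if key < b then some key else some b

def choose_triplet_key_py_alt (dataset_name : String) (complete_triplets : List (String × String)) : Option String :=
  if complete_triplets = [] then none
  else if dataset_name ∈ complete_triplets.map Prod.fst then some dataset_name
  else
    let target := PySem.Str.lower dataset_name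
    let st := (complete_triplets.map Prod.fst).foldl
      (fun (s : Option String × Option String × Option String) key =>
        let ba := pvUpdMin s.2.2 key
        let low := PySem.Str.lower key
        let be := if low == target then pvUpdMin s.1 key else s.1
        let bp := if PySem.Str.startswith low target then pvUpdMin s.2.1 key else s.2.1
        (be, bp, ba))
      (none, none, none)
    match st.1 with
    | some key => some key
    | none =>
      match st.2.1 with
      | some key => some key
      | none => st.2.2

-- ===== PRECONDITION & SPEC =====
def Spec_choose_triplet_key_py (dataset_name : String) (complete_triplets : List (String × String)) (out : Option String) : Prop := out = choose_triplet_key_py_alt dataset_name complete_triplets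
instance (dataset_name : String) (complete_triplets : List (String × String)) (out : Option String) : Decidable (Spec_choose_triplet_key_py dataset_name complete_triplets out) := by unfold Spec_choose_triplet_key_py; infer_instance

-- ===== CLAIM (what is proved, stated in full; the proofs are below) =====
def Claim_equal_choose_triplet_key_py : Prop := ∀ (dataset_name : String) (complete_triplets : List (String × String)), Dom_choose_triplet_key_py dataset_name complete_triplets → Spec_choose_triplet_key_py dataset_name complete_triplets (choose_triplet_key_py dataset_name complete_triplets)

-- ===== LEMMAS AND PROOFS =====

-- one of B's three independent running minima, as a standalone fold
def pvFoldMin (p : String → Bool) (xs : List String) : Option String :=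
  xs.foldl (fun acc k => if p k then pvUpdMin acc k else acc) none

theorem pvTriple_eq (xs : List String) (pe pp : String → Bool)
    (a b c : Option String) :
    xs.foldl
      (fun (s : Option String × Option String × Option String) key =>
        (if pe key then pvUpdMin s.1 key else s.1,
         if pp key then pvUpdMin s.2.1 key else s.2.1,
         pvUpdMin s.2.2 key)) (a, b, c)
    = (xs.foldl (fun acc k => if pe k then pvUpdMin acc k else acc) a,
       xs.foldl (fun acc k => if pp k then pvUpdMin acc k else acc) b,
       xs.foldl (fun acc k => pvUpdMin acc k) c) := by
  induction xs generalizing a b c with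
  | nil => rfl
  | cons h t ih => simp [List.foldl_cons, ih]

theorem pvUpdMin_some (b k : String) : pvUpdMin (some b) k = some (min b k) := by
  unfold pvUpdMin
  by_cases h : k < b
  · simp [h, min_eq_right (le_of_lt h)]
  · simp [h, min_eq_left (le_of_not_gt h)]

theorem pvFoldMin_some (p : String → Bool) (xs : List String) (b : String) :
    xs.foldl (fun acc k => if p k then pvUpdMin acc k else acc) (some b)
      = some ((xs.filter p).foldl min b) := by
  induction xs generalizing b with
  | nil => rfl
  | cons h t ih =>
    rw [List.foldl_cons]
    by_cases hp : p h
    · simp only [hp, if_true]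
      rw [pvUpdMin_some, List.filter_cons_of_pos hp, List.foldl_cons]
      exact ih (min b h)
    · simp only [hp]
      rw [List.filter_cons_of_neg hp]
      exact ih b

theorem pvFoldMin_eq (p : String → Bool) (xs : List String) :
    pvFoldMin p xs = match xs.filter p with
      | [] => none
      | h :: t => some (t.foldl min h) := by
  unfold pvFoldMin
  induction xs with
  | nil => rfl
  | cons h t ih =>
    rw [List.foldl_cons]
    by_cases hp : p h
    · simp only [hp, if_true]
      rw [List.filter_cons_of_pos hp]
      show t.foldl (fun acc k => if p k then pvUpdMin acc k else acc) (some h) = _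
      exact pvFoldMin_some p t h
    · simp only [hp]
      rw [List.filter_cons_of_neg hp]
      exact ih

theorem pvFoldlMin_mem (h : String) (t : List String) : t.foldl min h ∈ h :: t := by
  induction t generalizing h with
  | nil => simp
  | cons x xs ih =>
    rw [List.foldl_cons]
    rcases List.mem_cons.mp (ih (min h x)) with hm | hm
    · rcases min_cases h x with ⟨he, _⟩ | ⟨he, _⟩
      · rw [hm, he]; simp
      · rw [hm, he]; simp
    · simp [hm]

theorem pvFoldlMin_le (h : String) (t : List String) :
    ∀ y ∈ h :: t, t.foldl min h ≤ y := by
  induction t generalizing h with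
  | nil =>
    intro y hy
    simp at hy
    exact hy ▸ le_rfl
  | cons x xs ih =>
    intro y hy
    rw [List.foldl_cons]
    have hbase : List.foldl min (min h x) xs ≤ min h x := ih (min h x) (min h x) (by simp)
    rcases List.mem_cons.mp hy with he | hy'
    · rw [he]; exact le_trans hbase (min_le_left h x)
    · rcases List.mem_cons.mp hy' with he | hy''
      · rw [he]; exact le_trans hbase (min_le_right h x)
      · exact ih (min h x) y (by simp [hy''])

-- characterization of foldMin
theorem pvFoldMin_none_iff (p : String → Bool) (xs : List String) :
    pvFoldMin p xs = none ↔ xs.filter p = [] := by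
  rw [pvFoldMin_eq]
  cases xs.filter p <;> simp

theorem pvFoldMin_char (p : String → Bool) (xs : List String) (m : String)
    (hm : pvFoldMin p xs = some m) :
    m ∈ xs ∧ p m = true ∧ ∀ y ∈ xs, p y = true → m ≤ y := by
  rw [pvFoldMin_eq] at hm
  cases hf : xs.filter p with
  | nil => rw [hf] at hm; simp at hm
  | cons h t =>
    rw [hf] at hm
    simp only [Option.some.injEq] at hm
    subst hm
    have hmem : t.foldl min h ∈ xs.filter p := hf ▸ pvFoldlMin_mem h t
    have hle : ∀ y ∈ xs.filter p, t.foldl min h ≤ y := hf ▸ pvFoldlMin_le h t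
    refine ⟨(List.mem_filter.mp hmem).1, (List.mem_filter.mp hmem).2, ?_⟩
    intro y hy hpy
    exact hle y (List.mem_filter.mpr ⟨hy, hpy⟩)

-- first match in a ≤-sorted list is a minimum among matches
theorem pvFind_char (p : String → Bool) (l : List String)
    (hl : l.Pairwise (· ≤ ·)) (m : String) (hm : l.find? p = some m) :
    m ∈ l ∧ p m = true ∧ ∀ y ∈ l, p y = true → m ≤ y := by
  induction l with
  | nil => simp at hm
  | cons h t ih =>
    rcases List.pairwise_cons.mp hl with ⟨hh, ht⟩
    by_cases hp : p h
    · simp only [List.find?_cons, hp] at hm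
      simp only [Option.some.injEq] at hm
      subst hm
      refine ⟨by simp, hp, ?_⟩
      intro y hy _
      rcases List.mem_cons.mp hy with rfl | hy'
      · exact le_rfl
      · exact hh y hy'
    · have hpf : p h = false := by simpa using hp
      simp only [List.find?_cons, hpf] at hm
      obtain ⟨h1, h2, h3⟩ := ih ht hm
      refine ⟨List.mem_cons_of_mem _ h1, h2, ?_⟩
      intro y hy hpy
      rcases List.mem_cons.mp hy with rfl | hy'
      · exact absurd hpy (by simp [hp])
      · exact h3 y hy' hpy

theorem pvFind_none_iff (p : String → Bool) (l : List String) :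
    l.find? p = none ↔ ∀ y ∈ l, ¬ p y = true := by
  simp [List.find?_eq_none]

-- the central equation: first p-match of sorted(xs) = B's running minimum over xs
theorem pvFind_sorted_eq_foldMin (p : String → Bool) (xs : List String) :
    (PySem.List.sorted xs (fun x => x) false).find? p = pvFoldMin p xs := by
  have hperm : (PySem.List.sorted xs (fun x => x) false).Perm xs :=
    PySem.List.sorted_perm xs (fun x => x) false
  have hpw : (PySem.List.sorted xs (fun x => x) false).Pairwise (· ≤ ·) :=
    PySem.List.sorted_pairwise xs (fun x => x)
  cases hA : (PySem.List.sorted xs (fun x => x) false).find? p with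
  | none =>
    have hall := (pvFind_none_iff p _).mp hA
    symm
    rw [pvFoldMin_none_iff, List.filter_eq_nil_iff]
    intro y hy
    exact hall y (hperm.mem_iff.mpr hy)
  | some m =>
    obtain ⟨hm1, hm2, hm3⟩ := pvFind_char p _ hpw m hA
    cases hB : pvFoldMin p xs with
    | none =>
      have := (pvFoldMin_none_iff p xs).mp hB
      rw [List.filter_eq_nil_iff] at this
      exact absurd hm2 (by simp [this m (hperm.mem_iff.mp hm1)])
    | some m' =>
      obtain ⟨hn1, hn2, hn3⟩ := pvFoldMin_char p xs m' hB
      have h1 : m ≤ m' := hm3 m' (hperm.mem_iff.mpr hn1) hn2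
      have h2 : m' ≤ m := hn3 m (hperm.mem_iff.mp hm1) hm2
      exact congrArg some (le_antisymm h1 h2)

-- keys[0] of a nonempty list = find? with the always-true predicate
theorem pvFind_true_eq_head (l : List String) :
    l.find? (fun _ => true) = l.head? := by
  cases l <;> simp

-- ===== VERDICT (by name: the statement is the Claim_ definition above) =====
theorem choose_triplet_key_py_spec : Claim_equal_choose_triplet_key_py := by
  intro dataset_name complete_triplets _
  unfold Spec_choose_triplet_key_py choose_triplet_key_py choose_triplet_key_py_alt
  by_cases hnil : complete_triplets = []
  · simp [hnil]
  · simp only [hnil, if_false]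
    by_cases hmem : dataset_name ∈ complete_triplets.map Prod.fst
    · simp [hmem]
    · simp only [hmem, if_false]
      set xs := complete_triplets.map Prod.fst with hxs
      set target := PySem.Str.lower dataset_name with htgt
      have htrip := pvTriple_eq xs
        (fun key => PySem.Str.lower key == target)
        (fun key => PySem.Str.startswith (PySem.Str.lower key) target)
        none none none
      simp only [htrip]
      have hba : xs.foldl (fun acc k => pvUpdMin acc k) none
          = pvFoldMin (fun _ => true) xs := by
        unfold pvFoldMin; simp
      rw [hba]
      rw [show (xs.foldl (fun acc k => if PySem.Str.lower k == target then pvUpdMin acc k else acc) none)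
          = pvFoldMin (fun k => PySem.Str.lower k == target) xs from rfl]
      rw [show (xs.foldl (fun acc k => if PySem.Str.startswith (PySem.Str.lower k) target then pvUpdMin acc k else acc) none)
          = pvFoldMin (fun k => PySem.Str.startswith (PySem.Str.lower k) target) xs from rfl]
      rw [← pvFind_sorted_eq_foldMin, ← pvFind_sorted_eq_foldMin, ← pvFind_sorted_eq_foldMin]
      have hkeys : PySem.List.sorted xs (fun x => x) false ≠ [] := by
        rw [Ne, PySem.List.sorted_eq_nil_iff]
        simpa [hxs] using hnil
      have hget : PySem.List.pyGet? (PySem.List.sorted xs (fun x => x) false) 0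
          = (PySem.List.sorted xs (fun x => x) false).find? (fun _ => true) := by
        rw [pvFind_true_eq_head, PySem.List.pyGet?_zero]
        cases h : PySem.List.sorted xs (fun x => x) false with
        | nil => exact absurd h hkeys
        | cons a t => simp
      rw [hget]
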